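-- pv_equiv track=rewrite | github.com/nbahador/bigquery-adk-code | interpretability_utils.py | trace_decision_pathway
-- ===== SOURCE A (Python) =====
-- from typing import Dict, List, Any
--
-- def trace_decision_pathway(rules_activated: List[Dict]) -> List[str]:
--     """Trace the decision-making pathway"""
--     pathway = []
--
--     if any(rule['rule_id'] == 'UNUSUAL_COMBO' for rule in rules_activated):
--         pathway.append("Primary trigger: Unusual diagnosis-procedure combination")
--
--     if any(rule['rule_id'] == 'HIGH_AMOUNT' for rule in rules_activated):
--         pathway.append("Supporting factor: Abnormally high claim amount")
--
--     if any(rule['rule_id'] == 'GEOGRAPHIC_RESTRICTION' for rule in rules_activated):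
--         pathway.append("Geographic constraint violation")
--
--     return pathway
-- ===== SOURCE B (Python) =====
-- def trace_decision_pathway(rules_activated):
--     """Trace the decision-making pathway"""
--     unusual = high = geo = False
--     for rule in rules_activated:
--         if unusual and high and geo:
--             break
--         rid = rule['rule_id']
--         if rid == 'UNUSUAL_COMBO':
--             unusual = True
--         elif rid == 'HIGH_AMOUNT':
--             high = True
--         elif rid == 'GEOGRAPHIC_RESTRICTION':
--             geo = True
--     pathway = []
--     if unusual:
--         pathway.append("Primary trigger: Unusual diagnosis-procedure combination")
--     if high:
--         pathway.append("Supporting factor: Abnormally high claim amount")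
--     if geo:
--         pathway.append("Geographic constraint violation")
--     return pathway
-- ===== Notes on version B (the rewrite author's own statement) =====
-- stated objective: alternative
-- what changed: Replaces the three separate any() scans over rules_activated with a single pass that maintains three found-flags and breaks as soon as all three rule ids are seen.
import Mathlib
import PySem

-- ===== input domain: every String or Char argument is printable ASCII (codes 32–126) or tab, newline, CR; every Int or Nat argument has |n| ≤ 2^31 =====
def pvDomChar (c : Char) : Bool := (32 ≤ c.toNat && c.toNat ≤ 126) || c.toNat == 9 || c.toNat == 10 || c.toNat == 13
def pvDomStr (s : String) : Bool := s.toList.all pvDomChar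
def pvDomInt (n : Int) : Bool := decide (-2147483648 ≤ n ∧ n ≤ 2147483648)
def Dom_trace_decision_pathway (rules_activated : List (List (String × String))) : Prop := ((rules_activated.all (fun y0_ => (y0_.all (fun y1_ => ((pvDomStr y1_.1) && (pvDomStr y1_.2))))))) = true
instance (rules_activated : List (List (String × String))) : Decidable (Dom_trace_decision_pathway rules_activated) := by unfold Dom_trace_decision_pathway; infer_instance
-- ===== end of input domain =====

-- B replaces A's three any() scans with one early-exit pass keeping three found-flags (alternative decomposition).

-- ===== PORT A =====
-- rule['rule_id'] raises KeyError on a dict without the key; the port reads the lookup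
-- through getD "" — exact on Pre_ inputs, where every access Python performs finds the key.
def trace_decision_pathway (rules_activated : List (List (String × String))) : List String :=
  let pathway : List String := []
  let pathway := if rules_activated.any (fun rule => ((PySem.Dict.get? (PySem.Dict.mk rule) "rule_id").getD "") == "UNUSUAL_COMBO")
    then pathway ++ ["Primary trigger: Unusual diagnosis-procedure combination"] else pathway
  let pathway := if rules_activated.any (fun rule => ((PySem.Dict.get? (PySem.Dict.mk rule) "rule_id").getD "") == "HIGH_AMOUNT")
    then pathway ++ ["Supporting factor: Abnormally high claim amount"] else pathway
  let pathway := if rules_activated.any (fun rule => ((PySem.Dict.get? (PySem.Dict.mk rule) "rule_id").getD "") == "GEOGRAPHIC_RESTRICTION")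
    then pathway ++ ["Geographic constraint violation"] else pathway
  pathway

-- ===== PORT B =====
-- single pass with three found-flags; the loop breaks once all three are set
def pvAltScan : List (List (String × String)) → Bool → Bool → Bool → Bool × Bool × Bool
  | [], u, h, g => (u, h, g)
  | rule :: rest, u, h, g =>
    if u && h && g then (u, h, g)
    else
      let rid := (PySem.Dict.get? (PySem.Dict.mk rule) "rule_id").getD ""
      if rid == "UNUSUAL_COMBO" then pvAltScan rest true h g
      else if rid == "HIGH_AMOUNT" then pvAltScan rest u true g
      else if rid == "GEOGRAPHIC_RESTRICTION" then pvAltScan rest u h true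
      else pvAltScan rest u h g

def trace_decision_pathway_alt (rules_activated : List (List (String × String))) : List String :=
  match pvAltScan rules_activated false false false with
  | (u, h, g) =>
    (if u then ["Primary trigger: Unusual diagnosis-procedure combination"] else []) ++
    (if h then ["Supporting factor: Abnormally high claim amount"] else []) ++
    (if g then ["Geographic constraint violation"] else [])

-- ===== PRECONDITION & SPEC =====
-- Pre_ holds exactly where the Python A returns (no KeyError): every rule dict missing
-- 'rule_id' must be preceded by matches for all three ids, so every scan short-circuits before it.
def Pre_trace_decision_pathway (rules_activated : List (List (String × String))) : Prop :=
  ∀ p : Fin rules_activated.length, PySem.Dict.get? (PySem.Dict.mk rules_activated[p]) "rule_id" = none →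
    ∀ id ∈ ["UNUSUAL_COMBO", "HIGH_AMOUNT", "GEOGRAPHIC_RESTRICTION"],
      ∃ q : Fin rules_activated.length, q < p ∧ PySem.Dict.get? (PySem.Dict.mk rules_activated[q]) "rule_id" = some id
instance (rules_activated : List (List (String × String))) : Decidable (Pre_trace_decision_pathway rules_activated) := by unfold Pre_trace_decision_pathway; infer_instance

def pvWitness_trace_decision_pathway : (List (List (String × String))) :=
  [[("rule_id", "HIGH_AMOUNT")], [("rule_id", "OTHER"), ("x", "1")]]

def Spec_trace_decision_pathway (rules_activated : List (List (String × String))) (out : List String) : Prop := out = trace_decision_pathway_alt rules_activated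
instance (rules_activated : List (List (String × String))) (out : List String) : Decidable (Spec_trace_decision_pathway rules_activated out) := by unfold Spec_trace_decision_pathway; infer_instance

-- ===== CLAIM (what is proved, stated in full; the proofs are below) =====
def Claim_equal_trace_decision_pathway : Prop := ∀ (rules_activated : List (List (String × String))), Dom_trace_decision_pathway rules_activated → Pre_trace_decision_pathway rules_activated → Spec_trace_decision_pathway rules_activated (trace_decision_pathway rules_activated)

-- ===== LEMMAS AND PROOFS =====

-- the early-exit scan computes the same three flags as the three full any-scans
theorem pvAltScan_eq (rs : List (List (String × String))) (u h g : Bool) :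
    pvAltScan rs u h g =
      (u || rs.any (fun rule => ((PySem.Dict.get? (PySem.Dict.mk rule) "rule_id").getD "") == "UNUSUAL_COMBO"),
       h || rs.any (fun rule => ((PySem.Dict.get? (PySem.Dict.mk rule) "rule_id").getD "") == "HIGH_AMOUNT"),
       g || rs.any (fun rule => ((PySem.Dict.get? (PySem.Dict.mk rule) "rule_id").getD "") == "GEOGRAPHIC_RESTRICTION")) := by
  induction rs generalizing u h g with
  | nil => simp [pvAltScan]
  | cons rule rest ih =>
    by_cases hb : (u && h && g) = true
    · obtain ⟨⟨hu, hh⟩, hg⟩ := by simpa [Bool.and_eq_true] using hb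
      subst hu; subst hh; subst hg
      simp [pvAltScan]
    · simp only [pvAltScan, hb]
      by_cases h1 : ((PySem.Dict.get? (PySem.Dict.mk rule) "rule_id").getD "") == "UNUSUAL_COMBO"
      · simp [List.any_cons, h1, ih]
        constructor
        · simp [show ¬(((PySem.Dict.get? (PySem.Dict.mk rule) "rule_id").getD "") == "HIGH_AMOUNT") = true by
            intro hc; simp_all]
        · simp [show ¬(((PySem.Dict.get? (PySem.Dict.mk rule) "rule_id").getD "") == "GEOGRAPHIC_RESTRICTION") = true by
            intro hc; simp_all]
      · by_cases h2 : ((PySem.Dict.get? (PySem.Dict.mk rule) "rule_id").getD "") == "HIGH_AMOUNT"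
        · simp [h1, h2, List.any_cons, ih]
          simp [show ¬(((PySem.Dict.get? (PySem.Dict.mk rule) "rule_id").getD "") == "GEOGRAPHIC_RESTRICTION") = true by
            intro hc; simp_all]
        · by_cases h3 : ((PySem.Dict.get? (PySem.Dict.mk rule) "rule_id").getD "") == "GEOGRAPHIC_RESTRICTION"
          · simp [h1, h2, h3, List.any_cons, ih]
          · simp [h1, h2, h3, List.any_cons, ih]

-- ===== VERDICT (by name: the statement is the Claim_ definition above) =====
theorem trace_decision_pathway_spec : Claim_equal_trace_decision_pathway := by
  intro rs _ _
  show trace_decision_pathway rs = trace_decision_pathway_alt rs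
  simp only [trace_decision_pathway, trace_decision_pathway_alt, pvAltScan_eq, Bool.false_or]
  split_ifs <;> simp
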